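-- pv_equiv track=rewrite | github.com/gayong/Algorithm | 13th_week/jh/불량 사용자.py | check
-- ===== SOURCE A (Python) =====
-- def check(lst, ids, n):
--     for i in range(n):
--         # 길이가 같지않으면 안됨
--         if len(lst[i]) != len(ids[i]):
--             return
--
--         for j in range(len(lst[i])):
--             # *가 아닌데 단어가 같지않으면 안됨
--             if ids[i][j] != '*' and lst[i][j] != ids[i][j]:
--                 return
--
--     return sorted(lst)
-- ===== SOURCE B (Python) =====
-- def _mask(s, p):
--     # overlay: copy of s with the wildcard positions of p stamped in; None on length mismatch
--     if len(s) != len(p):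
--         return None
--     return ''.join(pc if pc == '*' else sc for sc, pc in zip(s, p))
--
-- def check(lst, ids, n):
--     masked = [_mask(lst[i], ids[i]) for i in range(n)]
--     if masked == ids[:len(masked)]:
--         return sorted(lst)
-- ===== Notes on version B (the rewrite author's own statement) =====
-- stated objective: alternative
-- what changed: Instead of comparing characters with early returns, B normalizes each candidate by overlaying the pattern's wildcard positions onto it (building a masked copy), then decides everything with one wholesale list equality against the patterns; it trades A's short-circuiting nested control flow for a build-then-compare pipeline.
-- outside the precondition, e.g. on check(['a'], ['bb'], 5): A returns None, B raises IndexError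
import Mathlib
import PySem

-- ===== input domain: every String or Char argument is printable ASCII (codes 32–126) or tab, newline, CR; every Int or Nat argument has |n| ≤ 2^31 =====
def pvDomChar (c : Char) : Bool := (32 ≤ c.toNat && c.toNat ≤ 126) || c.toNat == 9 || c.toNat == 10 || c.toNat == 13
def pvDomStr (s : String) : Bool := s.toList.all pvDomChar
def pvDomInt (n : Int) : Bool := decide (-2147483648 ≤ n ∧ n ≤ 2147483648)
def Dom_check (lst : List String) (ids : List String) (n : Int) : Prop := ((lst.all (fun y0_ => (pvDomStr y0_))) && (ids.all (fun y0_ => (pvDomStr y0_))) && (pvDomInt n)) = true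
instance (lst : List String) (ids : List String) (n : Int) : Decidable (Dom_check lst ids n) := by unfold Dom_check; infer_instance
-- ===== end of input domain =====

-- B normalizes each candidate by overlaying the pattern's wildcard positions onto it
-- (a masked copy) and then decides everything with one wholesale list comparison
-- against the patterns, instead of A's short-circuiting per-character loops (objective: alternative).

-- ===== PORT A =====
-- inner 'for j in range(len(lst[i]))' loop: true = a mismatch was found (A returns None)
def checkRowBad (s p : String) : Nat → Nat → Bool
  | j, fuel + 1 =>
    match PySem.Str.pyGet? p (j : Int), PySem.Str.pyGet? s (j : Int) with
    | some pc, some sc =>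
      if pc != '*' && sc != pc then true else checkRowBad s p (j + 1) fuel
    | _, _ => false   -- unreachable: j < len(s) = len(p)
  | _, 0 => false

-- outer 'for i in range(n)' loop; fuel = number of remaining iterations
def checkGo (lst ids : List String) : Nat → Nat → Option (List String)
  | _, 0 => some (PySem.List.sorted lst (fun x => x) false)
  | i, fuel + 1 =>
    match PySem.List.pyGet? lst (i : Int), PySem.List.pyGet? ids (i : Int) with
    | some s, some p =>
      if PySem.Str.len s != PySem.Str.len p then none
      else if checkRowBad s p 0 (PySem.Str.len s).toNat then none
      else checkGo lst ids (i + 1) fuel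
    | _, _ => none   -- IndexError (outside Pre_check)

def check (lst : List String) (ids : List String) (n : Int) : Option (List String) :=
  checkGo lst ids 0 n.toNat

-- ===== PORT B =====
-- _mask(s, p): None on length mismatch, else s with p's '*' positions stamped in
def maskOpt (s p : String) : Option String :=
  if s.toList.length != p.toList.length then none
  else some (String.ofList ((s.toList.zip p.toList).map fun cp => if cp.2 == '*' then cp.2 else cp.1))

def check_alt (lst : List String) (ids : List String) (n : Int) : Option (List String) :=
  -- masked = [_mask(lst[i], ids[i]) for i in range(n)]
  let masked : List (Option String) :=
    (PySem.List.pyRange 0 n 1).map fun i =>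
      match PySem.List.pyGet? lst i, PySem.List.pyGet? ids i with
      | some s, some p => maskOpt s p
      | _, _ => none   -- IndexError while building the list (outside Pre_check)
  -- masked == ids[:len(masked)]  (Optional[str] vs str compares None≠str elementwise,
  -- ported exactly by lifting the slice with Option.some)
  if masked == (PySem.List.slice ids (some 0) (some (masked.length : Int))).map some
  then some (PySem.List.sorted lst (fun x => x) false)
  else none

-- ===== PRECONDITION & SPEC =====
-- Pre_ excludes n larger than either list's length: there A raises IndexError unless an
-- earlier mismatch stops it (then A returns None while B, which always builds the full
-- masked list, raises IndexError — see cites).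
def Pre_check (lst : List String) (ids : List String) (n : Int) : Prop :=
  n ≤ (lst.length : Int) ∧ n ≤ (ids.length : Int)
instance (lst : List String) (ids : List String) (n : Int) : Decidable (Pre_check lst ids n) := by unfold Pre_check; infer_instance

def pvWitness_check : List String × List String × Int := (["abc", "axc"], ["a*c", "a*c"], 2)

def Spec_check (lst : List String) (ids : List String) (n : Int) (out : Option (List String)) : Prop := out = check_alt lst ids n
instance (lst : List String) (ids : List String) (n : Int) (out : Option (List String)) : Decidable (Spec_check lst ids n out) := by unfold Spec_check; infer_instance

-- ===== CLAIM (what is proved, stated in full; the proofs are below) =====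
def Claim_equal_check : Prop := ∀ (lst : List String) (ids : List String) (n : Int), Dom_check lst ids n → Pre_check lst ids n → Spec_check lst ids n (check lst ids n)

-- ===== LEMMAS AND PROOFS =====

-- proof-side wildcard predicate: the per-row condition of A written as one Bool
def matchStr (s p : String) : Bool :=
  s.toList.length == p.toList.length &&
    ((s.toList.zip p.toList).all fun cp => cp.2 == '*' || cp.1 == cp.2)

-- the per-index predicate both ports are reduced to
def altPred (lst ids : List String) (i : Int) : Bool :=
  match PySem.List.pyGet? lst i, PySem.List.pyGet? ids i with
  | some s, some p => matchStr s p
  | _, _ => false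

theorem zip_mask_eq (l1 l2 : List Char) (h : l1.length = l2.length) :
    (((l1.zip l2).map fun cp => if cp.2 == '*' then cp.2 else cp.1) = l2) ↔
      ((l1.zip l2).all fun cp => cp.2 == '*' || cp.1 == cp.2) = true := by
  induction l1 generalizing l2 with
  | nil => cases l2 with
    | nil => simp
    | cons b t => simp at h
  | cons a t ih =>
    cases l2 with
    | nil => simp at h
    | cons b t2 =>
      simp only [List.zip_cons_cons, List.map_cons, List.all_cons, List.cons.injEq,
        Bool.and_eq_true, Bool.or_eq_true]
      rw [ih t2 (by simpa using h)]
      by_cases hb : b = '*'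
      · simp [hb]
      · simp [hb]

theorem maskOpt_beq (s p : String) : (maskOpt s p == some p) = matchStr s p := by
  unfold maskOpt matchStr
  by_cases hl : s.toList.length = p.toList.length
  · rw [if_neg (by simp [hl])]
    rw [show (s.toList.length == p.toList.length) = true by simp [hl], Bool.true_and]
    rw [Bool.eq_iff_iff, beq_iff_eq, Option.some.injEq]
    constructor
    · intro hc
      have := congrArg String.toList hc
      rw [String.toList_ofList] at this
      exact (zip_mask_eq s.toList p.toList hl).mp this
    · intro hv
      rw [(zip_mask_eq s.toList p.toList hl).mpr hv, String.ofList_toList]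
  · rw [if_pos (by simp only [bne_iff_ne, ne_eq]; exact hl)]
    rw [show (s.toList.length == p.toList.length) = false from by
      simp only [beq_eq_false_iff_ne, ne_eq]; exact hl, Bool.false_and]
    rfl

theorem rowBad_eq (s p : String) (hl : s.toList.length = p.toList.length) :
    ∀ fuel j, j + fuel = s.toList.length →
      checkRowBad s p j fuel =
        !(((s.toList.drop j).zip (p.toList.drop j)).all fun cp => cp.2 == '*' || cp.1 == cp.2) := by
  intro fuel
  induction fuel with
  | zero =>
    intro j hj
    simp [checkRowBad, List.drop_eq_nil_of_le (by omega : s.toList.length ≤ j),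
      List.drop_eq_nil_of_le (by omega : p.toList.length ≤ j)]
  | succ fuel ih =>
    intro j hj
    have hjs : j < s.toList.length := by omega
    have hjp : j < p.toList.length := by omega
    rw [checkRowBad]
    rw [show PySem.Str.pyGet? p (j : Int) = some p.toList[j] by
      simp [List.getElem?_eq_getElem hjp]]
    rw [show PySem.Str.pyGet? s (j : Int) = some s.toList[j] by
      simp [List.getElem?_eq_getElem hjs]]
    simp only
    rw [List.drop_eq_getElem_cons hjs, List.drop_eq_getElem_cons hjp]
    simp only [List.zip_cons_cons, List.all_cons]
    by_cases hb : (p.toList[j] != '*' && s.toList[j] != p.toList[j]) = true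
    · have : (p.toList[j] == '*' || s.toList[j] == p.toList[j]) = false := by
        revert hb
        cases h1 : p.toList[j] == '*' <;> cases h2 : s.toList[j] == p.toList[j] <;> simp_all
      simp [hb, this]
    · have hb' : (p.toList[j] != '*' && s.toList[j] != p.toList[j]) = false := by
        revert hb; cases hx : (p.toList[j] != '*' && s.toList[j] != p.toList[j]) <;> simp_all
      have : (p.toList[j] == '*' || s.toList[j] == p.toList[j]) = true := by
        revert hb'
        cases h1 : p.toList[j] == '*' <;> cases h2 : s.toList[j] == p.toList[j] <;> simp_all
      rw [hb']
      simp only [Bool.false_eq_true, if_false]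
      rw [ih (j + 1) (by omega)]
      simp [this]

theorem go_eq (lst ids : List String) :
    ∀ fuel i, i + fuel ≤ lst.length → i + fuel ≤ ids.length →
      checkGo lst ids i fuel =
        (if (PySem.List.pyRange i (i + (fuel : Int)) 1).all (altPred lst ids)
         then some (PySem.List.sorted lst (fun x => x) false) else none) := by
  intro fuel
  induction fuel with
  | zero =>
    intro i _ _
    rw [PySem.List.pyRange_one_eq_nil (by push_cast; omega)]
    simp [checkGo]
  | succ fuel ih =>
    intro i hls hid
    have his : i < lst.length := by omega
    have hii : i < ids.length := by omega
    have hs : PySem.List.pyGet? lst (i : Int) = some lst[i] := by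
      simp [List.getElem?_eq_getElem his]
    have hp : PySem.List.pyGet? ids (i : Int) = some ids[i] := by
      simp [List.getElem?_eq_getElem hii]
    have ha : altPred lst ids (i : Int) = matchStr lst[i] ids[i] := by
      simp [altPred, hs, hp]
    rw [checkGo, hs, hp]
    rw [PySem.List.pyRange_one_cons (by push_cast; omega : (i : Int) < i + ((fuel + 1 : Nat) : Int))]
    simp only [List.all_cons, ha]
    by_cases hlen : lst[i].toList.length = ids[i].toList.length
    · rw [show (PySem.Str.len lst[i] != PySem.Str.len ids[i]) = false by
        simp only [PySem.Str.len_eq, bne_eq_false_iff_eq]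
        exact_mod_cast hlen]
      simp only [Bool.false_eq_true, if_false]
      have hms : matchStr lst[i] ids[i] = !(checkRowBad lst[i] ids[i] 0 lst[i].toList.length) := by
        have := rowBad_eq lst[i] ids[i] hlen lst[i].toList.length 0 (by omega)
        simp only [List.drop_zero] at this
        rw [this, Bool.not_not]
        simp [matchStr, hlen]
      have hfn : (PySem.Str.len lst[i]).toNat = lst[i].toList.length := by
        simp [PySem.Str.len_eq]
      rw [hfn]
      by_cases hbad : checkRowBad lst[i] ids[i] 0 lst[i].toList.length = true
      · rw [hbad, hms, hbad]
        simp
      · have hbad' : checkRowBad lst[i] ids[i] 0 lst[i].toList.length = false := by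
          revert hbad; cases hx : checkRowBad lst[i] ids[i] 0 lst[i].toList.length <;> simp_all
        rw [hbad']
        simp only [Bool.false_eq_true, if_false, hms, hbad', Bool.not_false, Bool.true_and]
        rw [ih (i + 1) (by omega) (by omega)]
        have e2 : ((i + 1 : Nat) : Int) + (fuel : Int) = (i : Int) + ((fuel + 1 : Nat) : Int) := by
          push_cast; ring
        rw [show ((i + 1 : Nat) : Int) = (i : Int) + 1 by push_cast; ring] at e2 ⊢
        rw [e2]
    · rw [show (PySem.Str.len lst[i] != PySem.Str.len ids[i]) = true by
        simp only [PySem.Str.len_eq, bne_iff_ne, ne_eq]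
        exact_mod_cast hlen]
      have : matchStr lst[i] ids[i] = false := by
        simp only [matchStr, Bool.and_eq_false_iff]
        left
        simp only [beq_eq_false_iff_ne, ne_eq]
        exact hlen
      simp [this]

-- B reduced to the same all-over-range form
theorem alt_eq (lst ids : List String) (n : Int)
    (h1 : n.toNat ≤ lst.length) (h2 : n.toNat ≤ ids.length) :
    check_alt lst ids n =
      (if (PySem.List.pyRange 0 n 1).all (altPred lst ids)
       then some (PySem.List.sorted lst (fun x => x) false) else none) := by
  unfold check_alt
  simp only
  set F : Int → Option String := (fun i =>
      match PySem.List.pyGet? lst i, PySem.List.pyGet? ids i with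
      | some s, some p => maskOpt s p
      | _, _ => none) with hF
  have hml : ((PySem.List.pyRange 0 n 1).map F).length = n.toNat := by
    rw [List.length_map, PySem.List.length_pyRange_one]
    omega
  rw [hml]
  rw [show PySem.List.slice ids (some 0) (some ((n.toNat : Nat) : Int)) = ids.take n.toNat from by
    rw [show (0 : Int) = ((0 : Nat) : Int) from rfl, PySem.List.slice_natCast]
    simp]
  congr 1
  rw [PySem.List.pyRange_one]
  simp only [sub_zero, List.map_map, List.all_map, Function.comp_def, zero_add]
  have htake : (ids.take n.toNat).map some = (List.range n.toNat).map (fun j => some (ids.getD j "")) := by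
    apply List.ext_getElem
    · simp
      omega
    · intro j hj1 hj2
      simp only [List.length_map, List.length_take] at hj1
      have hji : j < ids.length := by omega
      simp only [List.getElem_map, List.getElem_take, List.getElem_range]
      rw [List.getD_eq_getElem ids "" hji]
  rw [htake]
  have hc : (List.map (fun x => F ((x : Nat) : Int)) (List.range n.toNat) ==
        List.map (fun j => some (ids.getD j "")) (List.range n.toNat)) =
      ((List.range n.toNat).all fun x => altPred lst ids ((x : Nat) : Int)) := by
    rw [Bool.eq_iff_iff, beq_iff_eq, List.map_inj_left, List.all_eq_true]
    refine forall_congr' fun j => imp_congr_right fun hj => ?_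
    rw [List.mem_range] at hj
    have hjl : j < lst.length := by omega
    have hji : j < ids.length := by omega
    have hFg : F ((j : Nat) : Int) = maskOpt lst[j] ids[j] := by
      rw [hF]
      simp only
      rw [show PySem.List.pyGet? lst ((j : Nat) : Int) = some lst[j] by
          simp [List.getElem?_eq_getElem hjl],
        show PySem.List.pyGet? ids ((j : Nat) : Int) = some ids[j] by
          simp [List.getElem?_eq_getElem hji]]
    have haP : altPred lst ids ((j : Nat) : Int) = matchStr lst[j] ids[j] := by
      unfold altPred
      rw [show PySem.List.pyGet? lst ((j : Nat) : Int) = some lst[j] by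
          simp [List.getElem?_eq_getElem hjl],
        show PySem.List.pyGet? ids ((j : Nat) : Int) = some ids[j] by
          simp [List.getElem?_eq_getElem hji]]
    rw [hFg, haP, ← maskOpt_beq, beq_iff_eq, List.getD_eq_getElem ids "" hji]
  rw [hc]

-- ===== VERDICT (by name: the statement is the Claim_ definition above) =====
theorem check_spec : Claim_equal_check := by
  intro lst ids n _ hpre
  unfold Spec_check check
  rcases hpre with ⟨h1, h2⟩
  rw [go_eq lst ids n.toNat 0 (by omega) (by omega)]
  rw [alt_eq lst ids n (by omega) (by omega)]
  rw [show ((0 : Nat) : Int) = (0 : Int) by norm_num]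
  by_cases hn : 0 ≤ n
  · rw [show (0 : Int) + (n.toNat : Int) = n by omega]
  · rw [PySem.List.pyRange_one_eq_nil (by omega : n ≤ 0),
      PySem.List.pyRange_one_eq_nil (by omega : (0 : Int) + (n.toNat : Int) ≤ 0)]
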